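-- pv_equiv track=rewrite | github.com/weAIDB/CrackSQL | backend/preprocessor/TreeParser/antlr_tree/antlr_tree_parser.py | is_terminal_word
-- ===== SOURCE A (Python) =====
-- def is_terminal_word(g4_str: str):
--     """
--     Only care about keywords.
--     Only words match with xxx : "xxx" will be considered
--     """
--     i = 0
--     while i < len(g4_str):
--         if g4_str[i] == ':':
--             break
--         i = i + 1
--     repre = g4_str[i + 1:-1].strip()
--     quote_flag = 0
--     for i in range(0, len(repre)):
--         if repre[i].isspace():
--             continue
--         if quote_flag == 0 and repre[i] != '\'':
--             return False
--         elif repre[i] == '\'':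
--             quote_flag = 1 - quote_flag
--     return True
-- ===== SOURCE B (Python) =====
-- def is_terminal_word(g4_str: str):
--     colon = g4_str.find(':')
--     i = len(g4_str) if colon == -1 else colon
--     repre = g4_str[i + 1:-1].strip()
--     # declarative restatement: a char is legal if it is whitespace, a quote,
--     # or sits inside quotes (odd number of quotes before it)
--     return all(c.isspace() or c == "'"
--                or sum(d == "'" for d in repre[:k]) % 2 == 1
--                for k, c in enumerate(repre))
-- ===== Notes on version B (the rewrite author's own statement) =====
-- stated objective: simpler
-- what changed: The char-index while-loop is replaced by str.find, and the mutable quote_flag state machine by a single declarative all(...) over enumerate: a char is legal iff it is whitespace, a quote, or preceded by an odd number of quotes.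
import Mathlib
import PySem

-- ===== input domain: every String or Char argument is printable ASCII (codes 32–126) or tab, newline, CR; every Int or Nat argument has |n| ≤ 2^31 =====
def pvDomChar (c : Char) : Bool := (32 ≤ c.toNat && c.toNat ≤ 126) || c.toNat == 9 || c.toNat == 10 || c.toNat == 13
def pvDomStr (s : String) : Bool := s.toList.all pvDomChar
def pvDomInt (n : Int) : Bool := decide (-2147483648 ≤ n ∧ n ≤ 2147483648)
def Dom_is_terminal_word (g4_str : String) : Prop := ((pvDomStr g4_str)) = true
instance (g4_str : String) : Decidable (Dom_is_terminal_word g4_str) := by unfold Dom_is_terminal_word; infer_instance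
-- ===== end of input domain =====

-- B replaces A's while-loop + quote_flag state machine by str.find and one declarative
-- all(...) over positions (a char is legal iff whitespace, a quote, or after an odd
-- number of quotes); equal return value on every input.

-- ===== PORT A =====
-- the 'while i < len: if g4_str[i] == ':': break' loop
def pvFindColon : List Char → Nat → Nat
  | [], i => i
  | c :: rest, i => if c = ':' then i else pvFindColon rest (i + 1)

-- the 'for i in range(len(repre))' loop with quote_flag
def pvLoopA : List Char → Nat → Bool
  | [], _ => true
  | c :: rest, qf =>
    if PySem.Chars.isspace c then pvLoopA rest qf
    else if qf = 0 ∧ c ≠ '\'' then false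
    else if c = '\'' then pvLoopA rest (1 - qf)
    else pvLoopA rest qf

def is_terminal_word (g4_str : String) : Bool :=
  let s := g4_str.toList
  let i := pvFindColon s 0
  let repre := PySem.Chars.strip (PySem.List.slice s (some ((i : Int) + 1)) (some (-1)))
  pvLoopA repre 0

-- ===== PORT B =====
def is_terminal_word_alt (g4_str : String) : Bool :=
  let s := g4_str.toList
  let colon := PySem.Chars.find s [':']
  let i : Nat := if colon = -1 then s.length else colon.toNat
  let repre := PySem.Chars.strip (PySem.List.slice s (some ((i : Int) + 1)) (some (-1)))
  (PySem.List.enumerate repre).all (fun p =>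
    PySem.Chars.isspace p.2 || p.2 == '\'' ||
      ((PySem.List.slice repre none (some p.1)).count '\'') % 2 == 1)

-- ===== PRECONDITION & SPEC =====
def Spec_is_terminal_word (g4_str : String) (out : Bool) : Prop := out = is_terminal_word_alt g4_str
instance (g4_str : String) (out : Bool) : Decidable (Spec_is_terminal_word g4_str out) := by unfold Spec_is_terminal_word; infer_instance

-- ===== CLAIM (what is proved, stated in full; the proofs are below) =====
def Claim_equal_is_terminal_word : Prop := ∀ (g4_str : String), Dom_is_terminal_word g4_str → Spec_is_terminal_word g4_str (is_terminal_word g4_str)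

-- ===== LEMMAS AND PROOFS =====

-- A's colon scan is findIdx
theorem pvFindColon_eq (s : List Char) (i : Nat) :
    pvFindColon s i = i + s.findIdx (· == ':') := by
  induction s generalizing i with
  | nil => simp [pvFindColon]
  | cons c rest ih =>
    by_cases h : c = ':'
    · simp [pvFindColon, h, List.findIdx_cons]
    · have hb : (c == ':') = false := by simp [h]
      simp only [pvFindColon, if_neg h, List.findIdx_cons, hb, cond_false, ih]
      omega

-- B's find-based index is findIdx too
theorem find_colon_eq (s : List Char) :
    (if PySem.Chars.find s [':'] = -1 then s.length else (PySem.Chars.find s [':']).toNat)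
      = s.findIdx (· == ':') := by
  by_cases h : PySem.Chars.find s [':'] = -1
  · rw [if_pos h]
    rw [PySem.Chars.find_eq_neg_one_iff] at h
    symm
    rw [List.findIdx_eq_length]
    intro x hx
    have hne : x ≠ ':' := fun hc => h (hc ▸ (List.singleton_infix_iff x s).mpr hx)
    simpa using hne
  · rw [if_neg h]
    have hnn : 0 ≤ PySem.Chars.find s [':'] := by
      have := PySem.Chars.neg_one_le_find (s := s) (sub := [':'])
      omega
    obtain ⟨hpre, hmin⟩ := PySem.Chars.find_spec hnn
    set k := (PySem.Chars.find s [':']).toNat with hk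
    have hlen : k < s.length := by
      have h1 : 1 ≤ s.length - k := by simpa using hpre.length_le
      omega
    symm
    rw [List.findIdx_eq hlen]
    constructor
    · rcases hpre with ⟨t, ht⟩
      have hdk : s.drop k = ':' :: t := ht.symm
      have h0 : (s.drop k)[0]? = some ':' := by rw [hdk]; rfl
      have hsk : s[k]? = some ':' := by
        rw [← h0]; simp [List.getElem?_drop]
      simp only [List.getElem?_eq_getElem hlen, Option.some_inj] at hsk
      simp [hsk]
    · intro j hj
      have hjl : j < s.length := lt_trans hj hlen
      by_contra hb
      simp only [Bool.not_eq_false, beq_iff_eq] at hb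
      apply hmin j hj
      refine ⟨s.drop (j+1), ?_⟩
      have hdj : s.drop j = s[j] :: s.drop (j+1) := List.drop_eq_getElem_cons hjl
      rw [hdj, hb]
      rfl

theorem isspace_quote : PySem.Chars.isspace '\'' = false := by decide

-- characterisation of A's state machine
theorem pvLoopA_iff (r : List Char) (q : Nat) (hq : q ≤ 1) :
    pvLoopA r q = true ↔
      ∀ k, (h : k < r.length) →
        PySem.Chars.isspace r[k] = true ∨ r[k] = '\'' ∨ (q + (r.take k).count '\'') % 2 = 1 := by
  induction r generalizing q with
  | nil => simp [pvLoopA]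
  | cons c rest ih =>
    by_cases hsp : PySem.Chars.isspace c = true
    · have hcq : c ≠ '\'' := by
        intro hc; subst hc; rw [isspace_quote] at hsp; exact absurd hsp (by simp)
      rw [show pvLoopA (c :: rest) q = pvLoopA rest q by simp [pvLoopA, hsp]]
      rw [ih q hq]
      constructor
      · intro H k hk
        cases k with
        | zero => left; simpa using hsp
        | succ n =>
          have hn : n < rest.length := by simpa using hk
          have := H n hn
          simpa [List.count_cons, hcq] using this
      · intro H k hk
        have := H (k+1) (by simpa using hk)
        simpa [List.count_cons, hcq] using this
    · by_cases hcq : c = '\''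
      · subst hcq
        rw [show pvLoopA ('\'' :: rest) q = pvLoopA rest (1 - q) by
          simp [pvLoopA, isspace_quote]]
        rw [ih (1 - q) (by omega)]
        constructor
        · intro H k hk
          cases k with
          | zero => right; left; simp
          | succ n =>
            have hn : n < rest.length := by simpa using hk
            have := H n hn
            rcases this with h1 | h2 | h3
            · left; simpa using h1
            · right; left; simpa using h2
            · right; right
              have h3' : (1 - q + (rest.take n).count '\'') % 2 = 1 := h3
              simp only [List.take_succ_cons, List.count_cons, beq_self_eq_true,
                if_true]
              omega
        · intro H k hk
          have hH := H (k+1) (by simpa using hk)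
          rcases hH with h1 | h2 | h3
          · left; simpa using h1
          · right; left; simpa using h2
          · right; right
            simp only [List.take_succ_cons, List.count_cons, beq_self_eq_true,
              if_true] at h3
            omega
      · -- c not space, not quote
        rcases Nat.eq_or_lt_of_le hq with hq1 | hq0
        · -- q = 1
          subst hq1
          rw [show pvLoopA (c :: rest) 1 = pvLoopA rest 1 by simp [pvLoopA, hsp, hcq]]
          rw [ih 1 (le_refl 1)]
          constructor
          · intro H k hk
            cases k with
            | zero => right; right; simp
            | succ n =>
              have hn : n < rest.length := by simpa using hk
              have := H n hn
              simpa [List.count_cons, hcq] using this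
          · intro H k hk
            have := H (k+1) (by simpa using hk)
            simpa [List.count_cons, hcq] using this
        · -- q = 0
          have hq' : q = 0 := by omega
          subst hq'
          rw [show pvLoopA (c :: rest) 0 = false by simp [pvLoopA, hsp, hcq]]
          simp only [Bool.false_eq_true, false_iff]
          intro H
          have := H 0 (by simp)
          simp [hsp, hcq] at this

-- B's enumerate-all as a ∀ over indices
theorem enum_all_iff {α : Type} (f : Int × α → Bool) (r : List α) (n : Nat) :
    ((PySem.List.enumerate r (n : Int)).all f = true) ↔
      ∀ k, (h : k < r.length) → f (((n + k : Nat) : Int), r[k]) = true := by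
  induction r generalizing n with
  | nil => simp [PySem.List.enumerate]
  | cons c rest ih =>
    rw [show PySem.List.enumerate (c :: rest) (n : Int) = ((n : Int), c) :: PySem.List.enumerate rest ((n : Int) + 1) from rfl]
    rw [List.all_cons]
    have : ((n : Int) + 1) = ((n + 1 : Nat) : Int) := by push_cast; ring
    rw [this]
    constructor
    · intro H k hk
      simp only [Bool.and_eq_true] at H
      cases k with
      | zero => simpa using H.1
      | succ m =>
        have hm : m < rest.length := by simpa using hk
        have := (ih (n+1)).mp H.2 m hm
        have harith : ((n + 1 + m : Nat) : Int) = ((n + (m+1) : Nat) : Int) := by push_cast; ring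
        rw [harith] at this
        simpa using this
    · intro H
      simp only [Bool.and_eq_true]
      constructor
      · have := H 0 (by simp)
        simpa using this
      · rw [ih (n+1)]
        intro m hm
        have := H (m+1) (by simpa using hm)
        have harith : ((n + (m+1) : Nat) : Int) = ((n + 1 + m : Nat) : Int) := by push_cast; ring
        rw [harith] at this
        simpa using this

-- ===== VERDICT (by name: the statement is the Claim_ definition above) =====
theorem is_terminal_word_spec : Claim_equal_is_terminal_word := by
  intro g4_str _
  unfold Spec_is_terminal_word is_terminal_word is_terminal_word_alt
  simp only []
  rw [pvFindColon_eq, find_colon_eq]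
  simp only [Nat.zero_add]
  set r := PySem.Chars.strip
      (PySem.List.slice g4_str.toList (some ((g4_str.toList.findIdx (· == ':') : Int) + 1)) (some (-1))) with hr
  rw [Bool.eq_iff_iff]
  rw [pvLoopA_iff r 0 (by omega)]
  rw [show ((0 : Int)) = ((0 : Nat) : Int) from rfl]
  rw [enum_all_iff]
  apply forall_congr'
  intro k
  apply forall_congr'
  intro hk
  simp only [Nat.zero_add, PySem.List.slice_to_natCast]
  constructor
  · intro h
    rcases h with h1 | h2 | h3
    · simp [h1]
    · simp [h2]
    · simp [h3]
  · intro h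
    simp only [Bool.or_eq_true, beq_iff_eq] at h
    rcases h with (h1 | h2) | h3
    · exact Or.inl h1
    · exact Or.inr (Or.inl h2)
    · right; right
      simpa using h3
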